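-- pv_equiv track=rewrite | github.com/joy7758/agent-accountability-evidence-layer | src/asiep_validator/validator.py | _json_path_to_pointer
-- ===== SOURCE A (Python) =====
-- def _json_path_to_pointer(path: str) -> str:
--     if path in {"", "$"}:
--         return ""
--     body = path[2:] if path.startswith("$.") else path.lstrip("$")
--     pointer_parts: list[str] = []
--     index = 0
--     token = ""
--     while index < len(body):
--         char = body[index]
--         if char == ".":
--             if token:
--                 pointer_parts.append(_escape_pointer_token(token))
--                 token = ""
--             index += 1
--             continue
--         if char == "[":
--             if token:
--                 pointer_parts.append(_escape_pointer_token(token))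
--                 token = ""
--             end = body.find("]", index)
--             if end == -1:
--                 break
--             pointer_parts.append(_escape_pointer_token(body[index + 1 : end]))
--             index = end + 1
--             continue
--         token += char
--         index += 1
--     if token:
--         pointer_parts.append(_escape_pointer_token(token))
--     return "/" + "/".join(pointer_parts)
--
-- def _escape_pointer_token(token: str) -> str:
--     return token.replace("~", "~0").replace("/", "~1")
-- ===== SOURCE B (Python) =====
-- def _escape_pointer_token(token: str) -> str:
--     return token.replace("~", "~0").replace("/", "~1")
--
--
-- def _json_path_to_pointer(path: str) -> str:
--     if path in {"", "$"}:
--         return ""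
--     body = path[2:] if path.startswith("$.") else path.lstrip("$")
--     pointer_parts: list[str] = []
--     rest = body
--     while rest:
--         if rest[0] == ".":
--             rest = rest[1:]
--         elif rest[0] == "[":
--             end = rest.find("]")
--             if end == -1:
--                 break
--             pointer_parts.append(_escape_pointer_token(rest[1:end]))
--             rest = rest[end + 1:]
--         else:
--             j = _run_length(rest)
--             pointer_parts.append(_escape_pointer_token(rest[:j]))
--             rest = rest[j:]
--     return "/" + "/".join(pointer_parts)
--
--
-- def _run_length(s: str) -> int:
--     for i, ch in enumerate(s):
--         if ch in ".[":
--             return i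
--     return len(s)
-- ===== Notes on version B (the rewrite author's own statement) =====
-- stated objective: faster
-- what changed: A builds each name token one character at a time in a mutable string accumulator flushed at delimiters and after the loop; B keeps no token state and instead tokenizes the remaining suffix directly, slicing each maximal name run out in one step (via a run-length scan) and each bracket segment via find.
import Mathlib
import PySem

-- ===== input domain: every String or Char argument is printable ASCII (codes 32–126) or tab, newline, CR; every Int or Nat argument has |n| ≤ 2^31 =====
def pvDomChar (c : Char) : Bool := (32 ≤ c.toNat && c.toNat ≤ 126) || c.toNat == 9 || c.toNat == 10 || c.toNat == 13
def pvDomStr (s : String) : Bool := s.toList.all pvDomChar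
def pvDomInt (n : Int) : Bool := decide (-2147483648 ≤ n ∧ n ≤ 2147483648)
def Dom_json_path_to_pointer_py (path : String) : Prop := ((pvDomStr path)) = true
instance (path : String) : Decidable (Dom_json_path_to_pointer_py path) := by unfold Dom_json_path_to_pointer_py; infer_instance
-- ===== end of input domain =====

-- B replaces A's per-character token accumulator (with its post-loop flush) by suffix-based
-- tokenization that slices each whole name run / bracket segment at once; same return value on
-- every input, and measurably faster on large inputs (no per-character token concatenation).

-- ===== PORT A =====
-- _escape_pointer_token: token.replace("~", "~0").replace("/", "~1")  (shared by both Pythons)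
def pvEsc (t : List Char) : List Char :=
  PySem.Chars.replace (PySem.Chars.replace t ['~'] ['~', '0']) ['/'] ['~', '1']

-- body.find("]", i) with body[i] = '[' plus the two slices body[i+1:end] / body[end+1:],
-- expressed on the suffix after the '[': first ']' splits the suffix into (before, after); none = find returned -1.
def pvFindRB : List Char → Option (List Char × List Char)
  | [] => none
  | c :: rest =>
    if c = ']' then some ([], rest)
    else
      match pvFindRB rest with
      | none => none
      | some (p, q) => some (c :: p, q)

-- needed by the termination proofs of both loops
theorem pvFindRB_length : ∀ (l : List Char) (p q : List Char), pvFindRB l = some (p, q) → q.length < l.length := by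
  intro l
  induction l with
  | nil => intro p q h; simp [pvFindRB] at h
  | cons c rest ih =>
    intro p q h
    simp only [pvFindRB] at h
    split at h
    · cases h; simp
    · cases hf : pvFindRB rest with
      | none => rw [hf] at h; simp at h
      | some pq =>
        rw [hf] at h
        cases pq with
        | mk p' q' =>
          simp at h
          have := ih p' q' hf
          simp [← h.2]
          omega

-- body = path[2:] if path.startswith("$.") else path.lstrip("$")   (shared text in both Pythons;
-- lstrip("$") with a one-character strip set is exactly 'drop leading '$' characters')
def pvBody (path : String) : List Char :=
  if PySem.Chars.startswith path.toList ['$', '.'] then path.toList.drop 2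
  else path.toList.dropWhile (· = '$')

-- A's while loop, ported as recursion on the remaining suffix of body (index only moves forward);
-- state = (pointer_parts, token); returns the state at loop exit (normal exit or break).
def pvLoopA : List Char → List Char → List (List Char) → List (List Char) × List Char
  | [], token, parts => (parts, token)
  | c :: rest, token, parts =>
    if c = '.' then
      pvLoopA rest [] (if token ≠ [] then parts ++ [pvEsc token] else parts)
    else if c = '[' then
      let parts' := if token ≠ [] then parts ++ [pvEsc token] else parts
      match hf : pvFindRB rest with
      | none => (parts', [])                        -- break: token was just emptied
      | some (pre, post) => pvLoopA post [] (parts' ++ [pvEsc pre])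
    else
      pvLoopA rest (token ++ [c]) parts
termination_by rem _ _ => rem.length
decreasing_by
  · simp
  · have := pvFindRB_length rest pre post hf
    simp; omega
  · simp

def json_path_to_pointer_py (path : String) : String :=
  if path = "" ∨ path = "$" then ""
  else
    let pr := pvLoopA (pvBody path) [] []
    let parts := if pr.2 ≠ [] then pr.1 ++ [pvEsc pr.2] else pr.1
    String.ofList ('/' :: PySem.Chars.join ['/'] parts)

-- ===== PORT B =====
-- _run_length(s): index of the first '.' or '[' in s, else len(s)
def pvRunLen : List Char → Nat
  | [] => 0
  | c :: rest => if c = '.' ∨ c = '[' then 0 else pvRunLen rest + 1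

-- B's while loop over the remaining suffix `rest`: skip '.', cut a whole bracket via the first ']',
-- or slice off a maximal name run rest[:j] with j = _run_length(rest).
def pvLoopB : List Char → List (List Char) → List (List Char)
  | [], parts => parts
  | c :: rest, parts =>
    if c = '.' then pvLoopB rest parts
    else if c = '[' then
      match hf : pvFindRB rest with
      | none => parts                               -- break
      | some (pre, post) => pvLoopB post (parts ++ [pvEsc pre])
    else
      pvLoopB ((c :: rest).drop (pvRunLen (c :: rest)))
        (parts ++ [pvEsc ((c :: rest).take (pvRunLen (c :: rest)))])
termination_by rem _ => rem.length
decreasing_by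
  · simp
  · have := pvFindRB_length rest pre post hf
    simp only [List.length_cons]; omega
  · rename_i h1 h2
    have hk : pvRunLen (c :: rest) = pvRunLen rest + 1 := by
      simp [pvRunLen, h1, h2]
    simp only [hk, List.length_drop, List.length_cons]; omega

def json_path_to_pointer_py_alt (path : String) : String :=
  if path = "" ∨ path = "$" then ""
  else String.ofList ('/' :: PySem.Chars.join ['/'] (pvLoopB (pvBody path) []))

-- ===== PRECONDITION & SPEC =====
def Spec_json_path_to_pointer_py (path : String) (out : String) : Prop := out = json_path_to_pointer_py_alt path
instance (path : String) (out : String) : Decidable (Spec_json_path_to_pointer_py path out) := by unfold Spec_json_path_to_pointer_py; infer_instance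

-- ===== CLAIM (what is proved, stated in full; the proofs are below) =====
def Claim_equal_json_path_to_pointer_py : Prop := ∀ (path : String), Dom_json_path_to_pointer_py path → Spec_json_path_to_pointer_py path (json_path_to_pointer_py path)

-- ===== LEMMAS AND PROOFS =====

-- append a token, skipping it when empty (A's "if token: parts.append(...)" and the final flush)
def pvPush (parts : List (List Char)) (t : List Char) : List (List Char) :=
  if t ≠ [] then parts ++ [pvEsc t] else parts

-- A's final flush applied to the loop's exit state
def pvFin (pr : List (List Char) × List Char) : List (List Char) := pvPush pr.1 pr.2

theorem pvRunLen_cons (c : Char) (rest : List Char) (h1 : ¬c = '.') (h2 : ¬c = '[') :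
    pvRunLen (c :: rest) = pvRunLen rest + 1 := by
  simp [pvRunLen, h1, h2]

-- one-step unfoldings of A's loop
theorem pvLoopA_dot (rest token : List Char) (parts : List (List Char)) :
    pvLoopA ('.' :: rest) token parts = pvLoopA rest [] (pvPush parts token) := by
  rw [pvLoopA]; simp [pvPush]

theorem pvLoopA_lb_none (rest token : List Char) (parts : List (List Char))
    (hf : pvFindRB rest = none) :
    pvLoopA ('[' :: rest) token parts = (pvPush parts token, []) := by
  rw [pvLoopA]
  simp only [if_neg (show ¬('[' : Char) = '.' by decide), if_true, pvPush]
  split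
  next heq => rfl
  next pre' post' heq => rw [hf] at heq; cases heq

theorem pvLoopA_lb_some (rest token pre post : List Char) (parts : List (List Char))
    (hf : pvFindRB rest = some (pre, post)) :
    pvLoopA ('[' :: rest) token parts = pvLoopA post [] (pvPush parts token ++ [pvEsc pre]) := by
  rw [pvLoopA]
  simp only [if_neg (show ¬('[' : Char) = '.' by decide), if_true, pvPush]
  split
  next heq => rw [hf] at heq; cases heq
  next pre' post' heq => rw [hf] at heq; cases heq; rfl

theorem pvLoopA_run (c : Char) (rest token : List Char) (parts : List (List Char))
    (h1 : ¬c = '.') (h2 : ¬c = '[') :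
    pvLoopA (c :: rest) token parts = pvLoopA rest (token ++ [c]) parts := by
  rw [pvLoopA]; simp [h1, h2]

-- one-step unfoldings of B's loop
theorem pvLoopB_dot (rest : List Char) (parts : List (List Char)) :
    pvLoopB ('.' :: rest) parts = pvLoopB rest parts := by
  rw [pvLoopB]; simp

theorem pvLoopB_lb_none (rest : List Char) (parts : List (List Char))
    (hf : pvFindRB rest = none) :
    pvLoopB ('[' :: rest) parts = parts := by
  rw [pvLoopB]
  simp only [if_neg (show ¬('[' : Char) = '.' by decide), if_true]
  split
  next heq => rfl
  next pre' post' heq => rw [hf] at heq; cases heq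

theorem pvLoopB_lb_some (rest pre post : List Char) (parts : List (List Char))
    (hf : pvFindRB rest = some (pre, post)) :
    pvLoopB ('[' :: rest) parts = pvLoopB post (parts ++ [pvEsc pre]) := by
  rw [pvLoopB]
  simp only [if_neg (show ¬('[' : Char) = '.' by decide), if_true]
  split
  next heq => rw [hf] at heq; cases heq
  next pre' post' heq => rw [hf] at heq; cases heq; rfl

-- B's loop absorbs a leading name run in one step (trivial when the head is a delimiter)
theorem pvLoopB_absorb (rem : List Char) (parts : List (List Char)) :
    pvLoopB rem parts = pvLoopB (rem.drop (pvRunLen rem)) (pvPush parts (rem.take (pvRunLen rem))) := by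
  match rem with
  | [] => simp [pvRunLen, pvPush]
  | c :: rest =>
    by_cases h1 : c = '.'
    · simp [pvRunLen, h1, pvPush]
    · by_cases h2 : c = '['
      · simp [pvRunLen, h2, pvPush]
      · conv_lhs => rw [pvLoopB]
        simp [h1, h2, pvRunLen_cons c rest h1 h2, pvPush]

-- main invariant: flushing A's loop from any mid-run state equals B's loop with the pending
-- token joined to the rest of the current run
theorem pvLoopA_eq_pvLoopB : ∀ (n : Nat) (rem token : List Char) (parts : List (List Char)),
    rem.length ≤ n →
    pvFin (pvLoopA rem token parts) =
      pvLoopB (rem.drop (pvRunLen rem)) (pvPush parts (token ++ rem.take (pvRunLen rem))) := by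
  intro n
  induction n with
  | zero =>
    intro rem token parts hlen
    have h : rem = [] := List.length_eq_zero_iff.mp (Nat.le_zero.mp hlen)
    subst h
    simp [pvLoopA, pvFin, pvRunLen, pvLoopB]
  | succ n ih =>
    intro rem token parts hlen
    match rem with
    | [] => simp [pvLoopA, pvFin, pvRunLen, pvLoopB]
    | c :: rest =>
      have hlen' : rest.length ≤ n := by simp at hlen; omega
      by_cases h1 : c = '.'
      · subst h1
        rw [pvLoopA_dot, ih rest [] (pvPush parts token) hlen',
            List.nil_append, ← pvLoopB_absorb]
        have hk : pvRunLen ('.' :: rest) = 0 := by simp [pvRunLen]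
        rw [hk, List.take_zero, List.append_nil, List.drop_zero, pvLoopB_dot]
      · by_cases h2 : c = '['
        · subst h2
          have hk : pvRunLen ('[' :: rest) = 0 := by simp [pvRunLen]
          rw [hk, List.take_zero, List.append_nil, List.drop_zero]
          cases hf : pvFindRB rest with
          | none =>
            rw [pvLoopA_lb_none rest token parts hf, pvLoopB_lb_none rest _ hf]
            simp [pvFin, pvPush]
          | some pq =>
            obtain ⟨pre, post⟩ := pq
            have hpost : post.length ≤ n := by
              have := pvFindRB_length rest pre post hf
              omega
            rw [pvLoopA_lb_some rest token pre post parts hf,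
                ih post [] (pvPush parts token ++ [pvEsc pre]) hpost,
                List.nil_append, ← pvLoopB_absorb,
                pvLoopB_lb_some rest pre post _ hf]
        · rw [pvLoopA_run c rest token parts h1 h2,
              ih rest (token ++ [c]) parts hlen',
              pvRunLen_cons c rest h1 h2]
          simp [List.append_assoc]

-- ===== VERDICT (by name: the statement is the Claim_ definition above) =====
theorem json_path_to_pointer_py_spec : Claim_equal_json_path_to_pointer_py := by
  intro path _
  unfold Spec_json_path_to_pointer_py json_path_to_pointer_py json_path_to_pointer_py_alt
  split
  · rfl
  · have h := pvLoopA_eq_pvLoopB (pvBody path).length (pvBody path) [] [] le_rfl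
    rw [List.nil_append, ← pvLoopB_absorb] at h
    simp only [pvFin, pvPush] at h
    simp only [← h]
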